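-- pv_equiv track=rewrite | github.com/iceynano/nikke_TTStar | show_area.py | group_by_x
-- ===== SOURCE A (Python) =====
-- def group_by_x(items, x_thresh):
--     """Group items by their x-coordinate to create columns of labels."""
--     if not items:
--         return []
--     # Sort items by their left x-coordinate
--     items_sorted = sorted(items, key=lambda x: x["bbox"][0])
--
--     groups = []
--     current_group = [items_sorted[0]]
--
--     for i in range(1, len(items_sorted)):
--         prev = items_sorted[i - 1]["bbox"]
--         curr = items_sorted[i]["bbox"]
--
--         if curr[0] - prev[0] < x_thresh:
--             current_group.append(items_sorted[i])
--         else: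
--             groups.append(current_group)
--             current_group = [items_sorted[i]]
--
--     groups.append(current_group)
--     return groups
-- ===== SOURCE B (Python) =====
-- def group_by_x(items, x_thresh):
--     """Group items by their x-coordinate to create columns of labels."""
--     if not items:
--         return []
--     s = sorted(items, key=lambda it: it["bbox"][0])
--     n = len(s)
--     # index table of column breaks, then slice between consecutive bounds
--     cuts = [i for i in range(1, n) if s[i]["bbox"][0] - s[i - 1]["bbox"][0] >= x_thresh]
--     bounds = [0] + cuts + [n]
--     return [s[a:b] for a, b in zip(bounds, bounds[1:])]
-- ===== Notes on version B (the rewrite author's own statement) =====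
-- stated objective: alternative
-- what changed: Replaces A's accumulate-and-flush loop (mutating current_group and flushing it into groups at each gap) by first computing the index table of column breaks with one comprehension and then producing the groups as slices between consecutive boundaries.
-- outside the precondition, e.g. on group_by_x([{}], 1): A raises KeyError, B raises KeyError; on group_by_x([{'bbox': []}], 1): A raises IndexError, B raises IndexError
import Mathlib
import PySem

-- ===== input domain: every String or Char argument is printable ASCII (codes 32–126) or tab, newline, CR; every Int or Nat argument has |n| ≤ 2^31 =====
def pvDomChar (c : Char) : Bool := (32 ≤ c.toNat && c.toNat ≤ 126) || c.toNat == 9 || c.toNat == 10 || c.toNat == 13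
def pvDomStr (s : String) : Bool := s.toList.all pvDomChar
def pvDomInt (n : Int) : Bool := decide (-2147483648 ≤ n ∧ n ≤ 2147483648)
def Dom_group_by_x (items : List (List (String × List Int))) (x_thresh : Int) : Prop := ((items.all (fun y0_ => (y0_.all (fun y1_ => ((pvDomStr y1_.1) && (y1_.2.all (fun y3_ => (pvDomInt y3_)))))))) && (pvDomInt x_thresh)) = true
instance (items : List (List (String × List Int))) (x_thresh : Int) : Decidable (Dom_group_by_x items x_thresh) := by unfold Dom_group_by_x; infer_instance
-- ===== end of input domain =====

-- B replaces A's accumulate-and-flush loop by an index table of column breaks plus a slicing pass (alternative decomposition, same cost).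


-- it["bbox"]  (Python dict lookup; dict construction keeps the last value of a repeated key, as Dict.ofList does)
def pvBbox (it : List (String × List Int)) : List Int :=
  ((PySem.Dict.ofList it).get? "bbox").getD []

-- it["bbox"][0], the sort key (exact under Pre_: bbox present and nonempty)
def pvX (it : List (String × List Int)) : Int :=
  PySem.List.pyGetD (pvBbox it) 0 0

-- ===== PORT A =====
def group_by_x (items : List (List (String × List Int))) (x_thresh : Int) : List (List (List (String × List Int))) :=
  if items = [] then []
  else
    let s := PySem.List.sorted items (fun it => pvX it) false
    let st := (PySem.List.pyRange 1 (s.length : Int) 1).foldl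
      (fun (st : List (List (List (String × List Int))) × List (List (String × List Int))) i =>
        let prev := pvBbox (PySem.List.pyGetD s (i - 1) [])
        let curr := pvBbox (PySem.List.pyGetD s i [])
        if PySem.List.pyGetD curr 0 0 - PySem.List.pyGetD prev 0 0 < x_thresh then
          (st.1, st.2 ++ [PySem.List.pyGetD s i []])
        else
          (st.1 ++ [st.2], [PySem.List.pyGetD s i []]))
      ([], [PySem.List.pyGetD s 0 []])
    st.1 ++ [st.2]

-- ===== PORT B =====
def group_by_x_alt (items : List (List (String × List Int))) (x_thresh : Int) : List (List (List (String × List Int))) :=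
  if items = [] then []
  else
    let s := PySem.List.sorted items (fun it => pvX it) false
    let n : Int := s.length
    let cuts := (PySem.List.pyRange 1 n 1).filter
      (fun i => x_thresh ≤ pvX (PySem.List.pyGetD s i []) - pvX (PySem.List.pyGetD s (i - 1) []))
    let bounds : List Int := 0 :: (cuts ++ [n])
    (bounds.zip bounds.tail).map (fun ab => PySem.List.slice s (some ab.1) (some ab.2))

-- ===== PRECONDITION & SPEC =====
-- Pre_ excludes items without a "bbox" key or with an empty bbox list, on which Python A raises KeyError / IndexError.
def Pre_group_by_x (items : List (List (String × List Int))) (x_thresh : Int) : Prop :=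
  ∀ it ∈ items, ((PySem.Dict.ofList it).get? "bbox").getD [] ≠ []

instance (items : List (List (String × List Int))) (x_thresh : Int) : Decidable (Pre_group_by_x items x_thresh) := by unfold Pre_group_by_x; infer_instance

def pvWitness_group_by_x : (List (List (String × List Int))) × Int :=
  ([[("bbox", [3, 1])], [("bbox", [0, 2])]], 2)

def Spec_group_by_x (items : List (List (String × List Int))) (x_thresh : Int) (out : List (List (List (String × List Int)))) : Prop := out = group_by_x_alt items x_thresh
instance (items : List (List (String × List Int))) (x_thresh : Int) (out : List (List (List (String × List Int)))) : Decidable (Spec_group_by_x items x_thresh out) := by unfold Spec_group_by_x; infer_instance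

-- ===== CLAIM (what is proved, stated in full; the proofs are below) =====
def Claim_equal_group_by_x : Prop := ∀ (items : List (List (String × List Int))) (x_thresh : Int), Dom_group_by_x items x_thresh → Pre_group_by_x items x_thresh → Spec_group_by_x items x_thresh (group_by_x items x_thresh)

-- ===== LEMMAS AND PROOFS =====

-- the body of A's loop, as a named function
def pvStep (s : List (List (String × List Int))) (t : Int)
    (st : List (List (List (String × List Int))) × List (List (String × List Int))) (i : Int) :
    List (List (List (String × List Int))) × List (List (String × List Int)) :=
  let prev := pvBbox (PySem.List.pyGetD s (i - 1) [])
  let curr := pvBbox (PySem.List.pyGetD s i [])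
  if PySem.List.pyGetD curr 0 0 - PySem.List.pyGetD prev 0 0 < t then
    (st.1, st.2 ++ [PySem.List.pyGetD s i []])
  else
    (st.1 ++ [st.2], [PySem.List.pyGetD s i []])

-- B's slicing pass over a boundary list, as a named function
def pvChunks (s : List (List (String × List Int))) (L : List Int) : List (List (List (String × List Int))) :=
  (L.zip L.tail).map (fun ab => PySem.List.slice s (some ab.1) (some ab.2))

theorem pv_take_snoc {α : Type} (l : List α) (c k : Nat) (h : k < l.length) (hck : c ≤ k) :
    (l.drop c).take (k - c) ++ [l[k]] = (l.drop c).take (k + 1 - c) := by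
  have h2 : k - c < (l.drop c).length := by simp; omega
  have := List.take_concat_get (l := l.drop c) (i := k - c) (h := h2)
  simp only [List.concat_eq_append, List.getElem_drop] at this
  have hk : c + (k - c) = k := by omega
  simp only [hk] at this
  have hk1 : k + 1 - c = (k - c) + 1 := by omega
  rw [hk1, ← this]

theorem pv_slice_snoc {α : Type} (l : List α) (c k : Nat) (d : α) (h : k < l.length) (hck : c ≤ k) :
    PySem.List.slice l (some (c : Int)) (some (k : Int)) ++ [PySem.List.pyGetD l (k : Int) d]
      = PySem.List.slice l (some (c : Int)) (some ((k + 1 : Nat) : Int)) := by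
  rw [PySem.List.slice_natCast, PySem.List.slice_natCast, PySem.List.pyGetD_natCast,
    List.getD_eq_getElem l d h]
  exact pv_take_snoc l c k h hck

theorem pv_chunks_cons (s : List (List (String × List Int))) (a b : Int) (L : List Int) :
    pvChunks s (a :: b :: L) = PySem.List.slice s (some a) (some b) :: pvChunks s (b :: L) := by
  simp [pvChunks]

theorem pv_main (s : List (List (String × List Int))) (t : Int) :
    ∀ (m k c : Nat) (G : List (List (List (String × List Int)))), c ≤ k → k + m = s.length → 0 < k →
    (((PySem.List.pyRange (k : Int) (s.length : Int) 1).foldl (pvStep s t)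
        (G, PySem.List.slice s (some (c : Int)) (some (k : Int)))).1
      ++ [((PySem.List.pyRange (k : Int) (s.length : Int) 1).foldl (pvStep s t)
        (G, PySem.List.slice s (some (c : Int)) (some (k : Int)))).2])
    = G ++ pvChunks s ((c : Int) ::
        ((PySem.List.pyRange (k : Int) (s.length : Int) 1).filter
          (fun i => t ≤ pvX (PySem.List.pyGetD s i []) - pvX (PySem.List.pyGetD s (i - 1) []))
        ++ [(s.length : Int)])) := by
  intro m
  induction m with
  | zero =>
    intro k c G hck hkm hk
    have hEq : (k : Int) = (s.length : Int) := by omega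
    rw [hEq, PySem.List.pyRange_one_eq_nil (le_refl _)]
    simp [pvChunks]
  | succ m ih =>
    intro k c G hck hkm hk
    have hlt : (k : Int) < (s.length : Int) := by omega
    rw [PySem.List.pyRange_one_cons hlt]
    simp only [List.foldl_cons, List.filter_cons]
    by_cases hcond : PySem.List.pyGetD (pvBbox (PySem.List.pyGetD s ((k : Int)) [])) 0 0
        - PySem.List.pyGetD (pvBbox (PySem.List.pyGetD s ((k : Int) - 1) [])) 0 0 < t
    · -- no cut at k: the current group grows by one element
      have hstep : pvStep s t (G, PySem.List.slice s (some (c : Int)) (some (k : Int))) (k : Int)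
          = (G, PySem.List.slice s (some (c : Int)) (some ((k + 1 : Nat) : Int))) := by
        simp only [pvStep, if_pos hcond]
        rw [pv_slice_snoc s c k [] (by omega) hck]
      have hpred : ¬ (t ≤ pvX (PySem.List.pyGetD s ((k:Int)) []) - pvX (PySem.List.pyGetD s ((k:Int) - 1) [])) := by
        simp only [pvX]; omega
      rw [hstep]
      have hcast : ((k : Int) + 1) = ((k + 1 : Nat) : Int) := by push_cast; ring
      rw [hcast]
      simp only [hpred, decide_false]
      rw [ih (k + 1) c G (by omega) (by omega) (by omega)]
      simp
    · -- cut at k: the current group is flushed and a new one starts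
      have hstep : pvStep s t (G, PySem.List.slice s (some (c : Int)) (some (k : Int))) (k : Int)
          = (G ++ [PySem.List.slice s (some (c : Int)) (some (k : Int))],
             PySem.List.slice s (some ((k : Nat) : Int)) (some ((k + 1 : Nat) : Int))) := by
        simp only [pvStep, if_neg hcond]
        rw [← pv_slice_snoc s k k [] (by omega) (le_refl _)]
        simp [PySem.List.slice_natCast]
      have hpred : (t ≤ pvX (PySem.List.pyGetD s ((k:Int)) []) - pvX (PySem.List.pyGetD s ((k:Int) - 1) [])) := by
        simp only [pvX]; omega
      rw [hstep]
      have hcast : ((k : Int) + 1) = ((k + 1 : Nat) : Int) := by push_cast; ring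
      rw [hcast]
      simp only [hpred, decide_true, if_pos, List.cons_append]
      rw [ih (k + 1) k (G ++ [PySem.List.slice s (some (c : Int)) (some (k : Int))]) (by omega) (by omega) (by omega)]
      rw [pv_chunks_cons]
      simp

-- ===== VERDICT (by name: the statement is the Claim_ definition above) =====
theorem group_by_x_spec : Claim_equal_group_by_x := by
  intro items t _ _
  unfold Spec_group_by_x group_by_x group_by_x_alt
  by_cases hit : items = []
  · simp [hit]
  · simp only [if_neg hit]
    set s := PySem.List.sorted items (fun it => pvX it) false with hs
    have hne : s ≠ [] := by
      rw [hs]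
      simpa [PySem.List.sorted_eq_nil_iff] using hit
    have hlen : 0 < s.length := List.length_pos_of_ne_nil hne
    have hinit : [PySem.List.pyGetD s 0 []]
        = PySem.List.slice s (some ((0 : Nat) : Int)) (some ((1 : Nat) : Int)) := by
      have := pv_slice_snoc s 0 0 [] hlen (le_refl _)
      simp only [Nat.cast_zero, Nat.cast_one, zero_add] at this ⊢
      rw [← this]
      simp [PySem.List.slice_to]
    have hmain := pv_main s t (s.length - 1) 1 0 [] (by omega) (by omega) (by omega)
    simp only [Nat.cast_zero, Nat.cast_one, List.nil_append] at hmain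
    show (((PySem.List.pyRange 1 (s.length : Int) 1).foldl (pvStep s t)
            ([], [PySem.List.pyGetD s 0 []])).1
        ++ [((PySem.List.pyRange 1 (s.length : Int) 1).foldl (pvStep s t)
            ([], [PySem.List.pyGetD s 0 []])).2])
      = pvChunks s (0 :: (((PySem.List.pyRange 1 (s.length : Int) 1).filter
          (fun i => t ≤ pvX (PySem.List.pyGetD s i []) - pvX (PySem.List.pyGetD s (i - 1) []))) ++ [(s.length : Int)]))
    rw [hinit]
    simp only [Nat.cast_zero, Nat.cast_one] at *
    exact hmain
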